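-- pv_equiv track=rewrite | github.com/glbter/computing-methods | lab6/utils.py | matrix_one
-- ===== SOURCE A (Python) =====
-- def matrix_one(n):
--     diag_m = []
--     for i in range(n):
--         row = []
--         for j in range(n):
--             if i != j:
--                 row.append(0)
--             else:
--                 row.append(1)
--         diag_m.append(row.copy())
--     return diag_m
-- ===== SOURCE B (Python) =====
-- def matrix_one(n):
--     if n <= 0:
--         return []
--     flat = [0] * (n * n)
--     flat[::n + 1] = [1] * n
--     return [flat[i * n:(i + 1) * n] for i in range(n)]
-- ===== Notes on version B (the rewrite author's own statement) =====
-- stated objective: alternative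
-- what changed: Replaces A's nested per-cell if/else loops with a flat one-dimensional zero buffer of n*n entries, a stride-(n+1) slice assignment that writes the diagonal ones, and a final chunking of the buffer into n rows.
import Mathlib
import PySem

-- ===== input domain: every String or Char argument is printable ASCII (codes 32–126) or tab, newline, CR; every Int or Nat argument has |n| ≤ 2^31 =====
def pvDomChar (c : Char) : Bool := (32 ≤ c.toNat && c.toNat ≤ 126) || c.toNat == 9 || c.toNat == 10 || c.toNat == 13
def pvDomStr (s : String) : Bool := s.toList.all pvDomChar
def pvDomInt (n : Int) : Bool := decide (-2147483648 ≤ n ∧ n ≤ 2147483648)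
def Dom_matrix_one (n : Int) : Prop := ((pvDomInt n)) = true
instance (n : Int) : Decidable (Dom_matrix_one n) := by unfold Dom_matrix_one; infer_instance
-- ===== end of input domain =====

-- B replaces A's nested per-cell if/else loops with a flat 1-D zero buffer, a stride-(n+1)
-- slice assignment writing the diagonal ones, and a chunking of the buffer into rows (objective: alternative).

-- ===== PORT A =====
-- for i in range(n): row = []; for j in range(n): row.append(0 or 1); diag_m.append(row.copy())
def matrix_one (n : Int) : List (List Int) :=
  (PySem.List.pyRange 0 n 1).foldl
    (fun diag_m i =>
      diag_m ++ [(PySem.List.pyRange 0 n 1).foldl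
        (fun row j => row ++ [if i ≠ j then (0 : Int) else 1]) []])
    []

-- ===== PORT B =====
-- if n <= 0: return []
-- flat = [0]*(n*n); flat[::n+1] = [1]*n; return [flat[i*n:(i+1)*n] for i in range(n)]
-- The extended-slice assignment flat[::n+1] = [1]*n is ported by hand: with n > 0 the step
-- n+1 is positive, so it writes 1 exactly at the indices i*(n+1) for i in range(n) — exact here.
def matrix_one_alt (n : Int) : List (List Int) :=
  if n ≤ 0 then []
  else
    let flat0 := List.replicate (n * n).toNat (0 : Int)
    let flat := (PySem.List.pyRange 0 n 1).foldl (fun f i => f.set (i * (n + 1)).toNat 1) flat0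
    (PySem.List.pyRange 0 n 1).map
      (fun i => PySem.List.slice flat (some (i * n)) (some ((i + 1) * n)))

-- ===== PRECONDITION & SPEC =====
def Spec_matrix_one (n : Int) (out : List (List Int)) : Prop := out = matrix_one_alt n
instance (n : Int) (out : List (List Int)) : Decidable (Spec_matrix_one n out) := by unfold Spec_matrix_one; infer_instance

-- ===== CLAIM =====
def Claim_equal_matrix_one : Prop := ∀ (n : Int), Dom_matrix_one n → Spec_matrix_one n (matrix_one n)

-- ===== LEMMAS AND PROOFS =====

-- the identity row of width m with the 1 at position i
def pvRow (m i : Nat) : List Int := (List.replicate m (0 : Int)).set i 1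

lemma pvRow_eq_map (m i : Nat) :
    pvRow m i = (List.range m).map (fun j : Nat => if (i : Int) ≠ (j : Int) then (0 : Int) else 1) := by
  apply List.ext_getElem
  · simp [pvRow]
  · intro j h1 h2
    simp only [pvRow, List.getElem_set, List.getElem_replicate, List.getElem_map,
      List.getElem_range]
    by_cases h : i = j <;> simp [h]

-- A's matrix, in map form
lemma matrix_one_eq_map (n : Int) :
    matrix_one n = (List.range n.toNat).map (fun i => pvRow n.toNat i) := by
  unfold matrix_one
  rw [PySem.List.pyRange_one]
  simp only [zero_add, sub_zero]
  rw [List.foldl_map]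
  rw [PySem.List.foldl_append_singleton_eq_map]
  apply List.map_congr_left
  intro i _
  rw [pvRow_eq_map, List.foldl_map, PySem.List.foldl_append_singleton_eq_map]
  simp

-- only the diagonal positions are multiples of the stride m+1
lemma pv_diag_index (m i j : Nat) (hi : i < m) (hj : j < m) :
    (∃ i' , i' < m ∧ i * m + j = i' * (m + 1)) ↔ j = i := by
  constructor
  · rintro ⟨i', hi', he⟩
    have hm : i' * (m + 1) = i' * m + i' := by ring
    rw [hm] at he
    rcases lt_trichotomy i' i with h | h | h
    · exfalso
      have hx : i' * m + m ≤ i * m := by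
        calc i' * m + m = (i' + 1) * m := by ring
          _ ≤ i * m := Nat.mul_le_mul_right m h
      omega
    · subst h
      exact Nat.add_left_cancel he
    · exfalso
      have hx : i * m + m ≤ i' * m := by
        calc i * m + m = (i + 1) * m := by ring
          _ ≤ i' * m := Nat.mul_le_mul_right m h
      omega
  · rintro rfl
    exact ⟨j, hj, by ring⟩

-- the flat buffer after the first b diagonal writes
lemma pvFlat_fold (m : Nat) : ∀ b ≤ m,
    ((List.range b).map (fun k : Nat => (k : Int))).foldl
        (fun f i => f.set (i * ((m : Int) + 1)).toNat 1)
        (List.replicate (m * m) (0 : Int))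
      = (List.range (m * m)).map (fun k => if ∃ i, i < b ∧ k = i * (m + 1) then (1 : Int) else 0) := by
  intro b hb
  induction b with
  | zero => simp
  | succ b ih =>
    rw [List.range_succ, List.map_append, List.foldl_append, ih (by omega)]
    simp only [List.map_cons, List.map_nil, List.foldl_cons, List.foldl_nil]
    have hcast : (((b : Int)) * ((m : Int) + 1)).toNat = b * (m + 1) := by
      rw [show ((b : Int)) * ((m : Int) + 1) = ((b * (m + 1) : Nat) : Int) by push_cast; ring,
        Int.toNat_natCast]
    rw [hcast]
    apply List.ext_getElem
    · simp
    · intro t h1 h2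
      simp only [List.getElem_set, List.getElem_map, List.getElem_range] at h1 h2 ⊢
      by_cases h : b * (m + 1) = t
      · subst h
        simp
      · rw [if_neg h]
        have hx : (∃ i, i ≤ b ∧ t = i * (m + 1)) ↔ (∃ i, i < b ∧ t = i * (m + 1)) := by
          constructor
          · rintro ⟨i, hi, rfl⟩
            refine ⟨i, ?_, rfl⟩
            rcases Nat.lt_or_eq_of_le hi with h' | h'
            · exact h'
            · subst h'; exact absurd rfl h
          · rintro ⟨i, hi, rfl⟩
            exact ⟨i, by omega, rfl⟩
        simp only [Nat.lt_succ_iff, hx]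

-- chunk i of the finished buffer is the identity row
lemma pvChunk (m i : Nat) (hi : i < m) :
    ((List.drop (i * m) ((List.range (m * m)).map
        (fun k => if ∃ i', i' < m ∧ k = i' * (m + 1) then (1 : Int) else 0))).take m)
      = pvRow m i := by
  have hlen : i * m + m ≤ m * m := by
    calc i * m + m = (i + 1) * m := by ring
      _ ≤ m * m := Nat.mul_le_mul_right m hi
  apply List.ext_getElem
  · simp [pvRow]
    omega
  · intro j h1 h2
    have hjm : j < m := by
      simp at h1; omega
    rw [List.getElem_take, List.getElem_drop]
    simp only [List.getElem_map, List.getElem_range]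
    simp only [pvRow, List.getElem_set, List.getElem_replicate]
    by_cases h : j = i
    · rw [if_pos ((pv_diag_index m i j hi hjm).mpr h), if_pos h.symm]
    · rw [if_neg (fun hh => h ((pv_diag_index m i j hi hjm).mp hh)),
        if_neg (fun hh => h hh.symm)]

lemma matrix_one_alt_nonpos (n : Int) (h : n ≤ 0) : matrix_one_alt n = [] := by
  rw [matrix_one_alt]; simp [h]

-- B's matrix, in map form, for positive n
lemma matrix_one_alt_eq_map (n : Int) (hn : 0 < n) :
    matrix_one_alt n = (List.range n.toNat).map (fun i => pvRow n.toNat i) := by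
  rw [matrix_one_alt, if_neg (by omega)]
  set m := n.toNat with hm
  have hnm : n = (m : Int) := by omega
  rw [hnm, PySem.List.pyRange_one]
  simp only [zero_add, sub_zero, Int.toNat_natCast]
  have hsq : ((m : Int) * (m : Int)).toNat = m * m := by
    rw [show ((m : Int)) * ((m : Int)) = ((m * m : Nat) : Int) by push_cast; ring,
      Int.toNat_natCast]
  rw [List.map_map, hsq]
  rw [pvFlat_fold m m le_rfl]
  apply List.map_congr_left
  intro i hi
  have him : i < m := List.mem_range.mp hi
  simp only [Function.comp]
  rw [show ((i : Int)) * ((m : Int)) = (((i * m : Nat) : Int)) by push_cast; ring]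
  rw [show ((i : Int) + 1) * ((m : Int)) = (((i * m : Nat) : Int)) + ((m : Nat) : Int) by
    push_cast; ring]
  rw [PySem.List.slice_natCast_add]
  exact pvChunk m i him

-- ===== VERDICT =====
theorem matrix_one_spec : Claim_equal_matrix_one := by
  intro n _
  unfold Spec_matrix_one
  rw [matrix_one_eq_map]
  by_cases h : n ≤ 0
  · rw [matrix_one_alt_nonpos n h]
    simp [Int.toNat_of_nonpos h]
  · rw [matrix_one_alt_eq_map n (by omega)]
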